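-- pv_equiv track=rewrite | github.com/sacadena/adventofcode2021 | day15.py | build_large_map
-- ===== SOURCE A (Python) =====
-- def build_large_map(risk, n=5):
--     """ Builds larger risk map with n extensions according to function `val` """
--     h, w = n*len(risk), n*len(risk[0])
--     out = []
--     for r in range(h):
--         out_sub = []
--         for c in range(w):
--             out_sub.append(val(risk, r, c))
--         out.append(out_sub)
--     return out
--
-- def val(risk, r, c):
--     h, w = len(risk), len(risk[0])
--     row, col = r % h, c % w
--     n, m = r // h, c // w
--     shift = lambda x, s: ((x + s - 1) % 9 + 1)
--     return shift(shift(risk[row][col], n), m)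
-- ===== SOURCE B (Python) =====
-- def build_large_map(risk, n=5):
--     """Builds the n-times-expanded risk map by growing it tile by tile:
--     normalize the base tile, stack n wrap-incremented copies vertically,
--     then extend every row rightward n-1 times by wrap-incrementing."""
--     w = len(risk[0])
--     tile = [[(x - 1) % 9 + 1 for x in row[:w]] for row in risk]
--     strip = []
--     cur = tile
--     for _ in range(n):
--         strip.extend(cur)
--         cur = [[v % 9 + 1 for v in row] for row in cur]
--     out = []
--     for row in strip:
--         full = list(row)
--         block = row
--         for _ in range(n - 1):
--             block = [v % 9 + 1 for v in block]
--             full.extend(block)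
--         out.append(full)
--     return out
-- ===== Notes on version B (the rewrite author's own statement) =====
-- stated objective: alternative
-- what changed: Instead of recomputing every cell from the base tile via r%h, r//h, c%w, c//w modular arithmetic, B normalizes the top-left tile once and grows the map incrementally, wrap-incrementing the previously built tile block vertically and then each row block horizontally.
-- outside the precondition, e.g. on build_large_map([], 3): A raises IndexError, B raises IndexError; on build_large_map([[1, 2], [3]], 1): A raises IndexError, B returns [[1, 2], [3]]
import Mathlib
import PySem

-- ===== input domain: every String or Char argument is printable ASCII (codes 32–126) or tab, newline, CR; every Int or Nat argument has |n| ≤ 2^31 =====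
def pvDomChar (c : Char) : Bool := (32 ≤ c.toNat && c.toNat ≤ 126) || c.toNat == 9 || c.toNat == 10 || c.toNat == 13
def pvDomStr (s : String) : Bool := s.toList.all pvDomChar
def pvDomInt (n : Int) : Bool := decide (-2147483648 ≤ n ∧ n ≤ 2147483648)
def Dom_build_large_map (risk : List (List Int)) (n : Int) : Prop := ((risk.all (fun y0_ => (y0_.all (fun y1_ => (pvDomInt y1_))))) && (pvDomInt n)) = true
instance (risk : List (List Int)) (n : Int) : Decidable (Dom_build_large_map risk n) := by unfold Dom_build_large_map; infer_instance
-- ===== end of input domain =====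

-- B builds the expanded map tile by tile (normalize, then wrap-increment the previously
-- built block) instead of recomputing every cell from the base via mod/div arithmetic;
-- objective: alternative decomposition.

-- ===== PORT A =====
-- literal port of helper `val`
def pvVal (risk : List (List Int)) (r c : Int) : Int :=
  let h : Int := risk.length
  let w : Int := ((PySem.List.pyGet? risk 0).getD []).length
  let row := PySem.Int.mod r h
  let col := PySem.Int.mod c w
  let nn := PySem.Int.floordiv r h
  let m := PySem.Int.floordiv c w
  let x := (PySem.List.pyGet? ((PySem.List.pyGet? risk row).getD []) col).getD 0
  PySem.Int.mod (PySem.Int.mod (x + nn - 1) 9 + 1 + m - 1) 9 + 1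

def build_large_map (risk : List (List Int)) (n : Int) : List (List Int) :=
  let h : Int := n * risk.length
  let w : Int := n * ((PySem.List.pyGet? risk 0).getD []).length
  (PySem.List.pyRange 0 h 1).foldl
    (fun out r =>
      out ++ [(PySem.List.pyRange 0 w 1).foldl (fun sub c => sub ++ [pvVal risk r c]) []]) []

-- ===== PORT B =====
def bNorm (x : Int) : Int := PySem.Int.mod (x - 1) 9 + 1   -- (x - 1) % 9 + 1
def bInc (v : Int) : Int := PySem.Int.mod v 9 + 1          -- v % 9 + 1

def build_large_map_alt (risk : List (List Int)) (n : Int) : List (List Int) :=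
  let w := ((PySem.List.pyGet? risk 0).getD []).length
  let tile := risk.map (fun row => (row.take w).map bNorm)   -- row[:w] with 0 ≤ w is take
  let sp := (PySem.List.pyRange 0 n 1).foldl
      (fun (st : List (List Int) × List (List Int)) _ =>
        (st.1 ++ st.2, st.2.map (fun row => row.map bInc))) ([], tile)
  sp.1.map (fun row =>
    ((PySem.List.pyRange 0 (n - 1) 1).foldl
      (fun (st : List Int × List Int) _ =>
        (st.1 ++ st.2.map bInc, st.2.map bInc)) (row, row)).1)

-- ===== PRECONDITION & SPEC =====
-- Pre_ excludes exactly the inputs where A raises IndexError: empty risk (len(risk[0]))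
-- and, when n > 0, a row shorter than the first row (risk[row][col] out of range).
def Pre_build_large_map (risk : List (List Int)) (n : Int) : Prop :=
  risk ≠ [] ∧ (0 < n → ∀ row ∈ risk, (risk.headD []).length ≤ row.length)
instance (risk : List (List Int)) (n : Int) : Decidable (Pre_build_large_map risk n) := by
  unfold Pre_build_large_map; infer_instance

def pvWitness_build_large_map : List (List Int) × Int := ([[1, 8], [9, 2]], 3)

def Spec_build_large_map (risk : List (List Int)) (n : Int) (out : List (List Int)) : Prop := out = build_large_map_alt risk n
instance (risk : List (List Int)) (n : Int) (out : List (List Int)) : Decidable (Spec_build_large_map risk n out) := by unfold Spec_build_large_map; infer_instance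

-- ===== CLAIM (what is proved, stated in full; the proofs are below) =====
def Claim_equal_build_large_map : Prop := ∀ (risk : List (List Int)) (n : Int), Dom_build_large_map risk n → Pre_build_large_map risk n → Spec_build_large_map risk n (build_large_map risk n)

-- ===== LEMMAS AND PROOFS =====

-- canonical common form of both programs (proof-only)
def pvE (risk : List (List Int)) (N w0 : Nat) : List (List Int) :=
  (List.range N).flatMap (fun k => risk.map (fun row =>
    (List.range N).flatMap (fun m =>
      (row.take w0).map (fun x => (x - 1 + ((k : Int) + (m : Int))) % 9 + 1))))

def pvIncT (t : List (List Int)) : List (List Int) := t.map (fun row => row.map bInc)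
def pvIncR (row : List Int) : List Int := row.map bInc

lemma pvFlatMapCongr {α β : Type} (l : List α) {f g : α → List β}
    (h : ∀ a ∈ l, f a = g a) : l.flatMap f = l.flatMap g := by
  induction l with
  | nil => rfl
  | cons a l ih =>
      simp only [List.flatMap_cons, h a (List.mem_cons_self), ih fun x hx => h x (List.mem_cons_of_mem a hx)]

lemma strip_fold (l : List Int) (acc cur : List (List Int)) :
    l.foldl (fun (st : List (List Int) × List (List Int)) _ =>
        (st.1 ++ st.2, st.2.map (fun row => row.map bInc))) (acc, cur)
      = (acc ++ (List.range l.length).flatMap (fun k => pvIncT^[k] cur), pvIncT^[l.length] cur) := by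
  induction l generalizing acc cur with
  | nil => simp
  | cons a l ih =>
      simp only [List.foldl_cons, List.length_cons]
      rw [show cur.map (fun row => row.map bInc) = pvIncT cur from rfl, ih]
      rw [List.range_succ_eq_map, List.flatMap_cons, List.flatMap_map]
      simp only [Function.iterate_zero_apply, Function.comp, Nat.succ_eq_add_one,
        ← Function.iterate_succ_apply, List.append_assoc]

lemma row_fold (l : List Int) (acc blk : List Int) :
    l.foldl (fun (st : List Int × List Int) _ =>
        (st.1 ++ st.2.map bInc, st.2.map bInc)) (acc, blk)
      = (acc ++ (List.range l.length).flatMap (fun m => pvIncR^[m + 1] blk), pvIncR^[l.length] blk) := by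
  induction l generalizing acc blk with
  | nil => simp
  | cons a l ih =>
      simp only [List.foldl_cons, List.length_cons]
      rw [show blk.map bInc = pvIncR blk from rfl, ih]
      rw [List.range_succ_eq_map, List.flatMap_cons, List.flatMap_map]
      simp only [Function.comp, Nat.succ_eq_add_one, ← Function.iterate_succ_apply,
        List.append_assoc]
      simp

lemma incT_iter (k : Nat) (t : List (List Int)) :
    pvIncT^[k] t = t.map (fun row => row.map (bInc^[k])) := by
  induction k generalizing t with
  | zero => simp
  | succ k ih =>
      rw [Function.iterate_succ_apply, ih]
      simp only [pvIncT, List.map_map]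
      apply List.map_congr_left; intro row _
      simp only [Function.comp, List.map_map]
      apply List.map_congr_left; intro x _
      exact (Function.iterate_succ_apply bInc k x).symm

lemma incR_iter (m : Nat) (row : List Int) : pvIncR^[m] row = row.map (bInc^[m]) := by
  induction m generalizing row with
  | zero => simp
  | succ m ih =>
      rw [Function.iterate_succ_apply, ih]
      simp only [pvIncR, List.map_map]
      apply List.map_congr_left; intro x _
      exact (Function.iterate_succ_apply bInc m x).symm

lemma bInc_iter_norm (s : Nat) (x : Int) : bInc^[s] (bNorm x) = (x - 1 + s) % 9 + 1 := by
  induction s with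
  | zero => simp [bNorm, PySem.Int.mod_eq_emod_of_pos (by norm_num : (0:Int) < 9)]
  | succ s ih =>
      rw [Function.iterate_succ_apply', ih]
      simp only [bInc, PySem.Int.mod_eq_emod_of_pos (by norm_num : (0:Int) < 9)]
      push_cast
      omega

lemma scalar2 (k m : Nat) (x : Int) :
    bInc^[m] (bInc^[k] (bNorm x)) = (x - 1 + ((k : Int) + (m : Int))) % 9 + 1 := by
  rw [← Function.iterate_add_apply, bInc_iter_norm]
  omega

lemma map_range_getD {α β : Type} (d : α) (f : α → β) (xs : List α) :
    (List.range xs.length).map (fun i => f (xs.getD i d)) = xs.map f := by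
  induction xs with
  | nil => rfl
  | cons x xs ih =>
      rw [List.length_cons, List.range_succ_eq_map, List.map_cons, List.map_map]
      simp only [List.getD_cons_zero, Function.comp_def, Nat.succ_eq_add_one, List.getD_cons_succ]
      rw [ih, List.map_cons]

lemma take_eq_map_range_getD {α β : Type} (d : α) (f : α → β) (xs : List α) (w : Nat)
    (h : w ≤ xs.length) :
    (List.range w).map (fun j => f (xs.getD j d)) = (xs.take w).map f := by
  have hlen : (xs.take w).length = w := by simp [h]
  rw [← map_range_getD d f (xs.take w), hlen]
  apply List.map_congr_left
  intro j hj
  rw [List.mem_range] at hj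
  congr 1
  rw [List.getD_eq_getElem?_getD, List.getD_eq_getElem?_getD, List.getElem?_take,
    if_pos hj]

lemma range_mul_flatMap (N H : Nat) :
    List.range (N * H) = (List.range N).flatMap (fun k => (List.range H).map (fun i => k * H + i)) := by
  induction N with
  | zero => simp
  | succ N ih =>
      rw [List.range_succ, List.flatMap_append, ← ih, Nat.succ_mul, List.range_add]
      simp

lemma extend_flatMap (N : Nat) (hN : 0 < N) (row : List Int) :
    row ++ (List.range (N - 1)).flatMap (fun m => pvIncR^[m + 1] row)
      = (List.range N).flatMap (fun m => pvIncR^[m] row) := by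
  obtain ⟨M, rfl⟩ : ∃ M, N = M + 1 := ⟨N - 1, (Nat.succ_pred_eq_of_pos hN).symm⟩
  rw [List.range_succ_eq_map, List.flatMap_cons, List.flatMap_map]
  simp [Function.comp]

lemma pvVal_eval (first : List Int) (rest : List (List Int))
    (hrow : ∀ row ∈ first :: rest, first.length ≤ row.length)
    (k m i j : Nat) (hi : i < (first :: rest).length) (hj : j < first.length) :
    pvVal (first :: rest) ((k * (first :: rest).length + i : Nat) : Int)
        ((m * first.length + j : Nat) : Int)
      = ((((first :: rest).getD i []).getD j 0) - 1 + ((k : Int) + (m : Int))) % 9 + 1 := by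
  have hw : 0 < first.length := Nat.lt_of_le_of_lt (Nat.zero_le j) hj
  have hH0 : 0 < (first :: rest).length := by simp
  have hmodr : (k * (first :: rest).length + i) % (first :: rest).length = i := by
    rw [Nat.add_comm, Nat.add_mul_mod_self_right]; exact Nat.mod_eq_of_lt hi
  have hdivr : (k * (first :: rest).length + i) / (first :: rest).length = k := by
    rw [Nat.add_comm, Nat.add_mul_div_right _ _ hH0, Nat.div_eq_of_lt hi, Nat.zero_add]
  have hmodc : (m * first.length + j) % first.length = j := by
    rw [Nat.add_comm, Nat.add_mul_mod_self_right]; exact Nat.mod_eq_of_lt hj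
  have hdivc : (m * first.length + j) / first.length = m := by
    rw [Nat.add_comm, Nat.add_mul_div_right _ _ hw, Nat.div_eq_of_lt hj, Nat.zero_add]
  have hj' : j < ((first :: rest).getD i []).length := by
    have hmem : (first :: rest).getD i [] ∈ first :: rest := by
      rw [List.getD_eq_getElem?_getD, List.getElem?_eq_getElem hi]
      exact List.getElem_mem hi
    exact lt_of_lt_of_le hj (hrow _ hmem)
  simp only [pvVal, PySem.List.pyGet?_zero_cons, Option.getD_some]
  rw [PySem.Int.mod_natCast, PySem.Int.mod_natCast, PySem.Int.floordiv_natCast,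
    PySem.Int.floordiv_natCast, hmodr, hdivr, hmodc, hdivc]
  simp only [PySem.List.pyGet?_natCast]
  rw [List.getElem?_eq_getElem hi]
  simp only [Option.getD_some]
  have hgetD : (first :: rest).getD i [] = (first :: rest)[i] := by
    simp [List.getD_eq_getElem?_getD, List.getElem?_eq_getElem hi]
  have hj'' : j < ((first :: rest)[i] : List Int).length := by
    rw [← hgetD]; exact hj'
  rw [List.getElem?_eq_getElem hj'']
  simp only [Option.getD_some]
  have hx : ((first :: rest)[i] : List Int)[j] = ((first :: rest).getD i []).getD j 0 := by
    rw [hgetD]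
    simp [List.getD_eq_getElem?_getD, List.getElem?_eq_getElem hj'']
  rw [hx, PySem.Int.mod_eq_emod_of_pos (by norm_num : (0:Int) < 9),
    PySem.Int.mod_eq_emod_of_pos (by norm_num : (0:Int) < 9)]
  omega

lemma A_eq_E (first : List Int) (rest : List (List Int)) (n : Int) (hn : 0 < n)
    (hrow : ∀ row ∈ first :: rest, first.length ≤ row.length) :
    build_large_map (first :: rest) n = pvE (first :: rest) n.toNat first.length := by
  set N := n.toNat with hN
  have hnN : n = (N : Int) := by omega
  have hH : n * (((first :: rest).length : Nat) : Int) - 0 = ((N * (first :: rest).length : Nat) : Int) := by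
    rw [hnN]; push_cast; ring
  have hW : n * ((first.length : Nat) : Int) - 0 = ((N * first.length : Nat) : Int) := by
    rw [hnN]; push_cast; ring
  simp only [build_large_map, PySem.List.pyGet?_zero_cons, Option.getD_some,
    PySem.List.foldl_append_singleton_eq_map, List.nil_append, PySem.List.pyRange_one,
    hH, hW, Int.toNat_natCast, List.map_map]
  rw [pvE, range_mul_flatMap N (first :: rest).length, List.map_flatMap]
  apply pvFlatMapCongr
  intro k _
  rw [List.map_map, ← map_range_getD ([] : List Int) _ (first :: rest)]
  apply List.map_congr_left
  intro i hi
  rw [List.mem_range] at hi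
  simp only [Function.comp, zero_add]
  rw [range_mul_flatMap N first.length, List.map_flatMap]
  apply pvFlatMapCongr
  intro m _
  rw [List.map_map]
  rw [← take_eq_map_range_getD (0 : Int) _ ((first :: rest).getD i []) first.length]
  · apply List.map_congr_left
    intro j hj
    rw [List.mem_range] at hj
    simp only [Function.comp, zero_add]
    exact pvVal_eval first rest hrow k m i j hi hj
  · have hmem : (first :: rest).getD i [] ∈ first :: rest := by
      rw [List.getD_eq_getElem?_getD, List.getElem?_eq_getElem hi]
      exact List.getElem_mem hi
    exact hrow _ hmem

lemma B_eq_E (risk : List (List Int)) (n : Int) (hn : 0 < n) :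
    build_large_map_alt risk n
      = pvE risk n.toNat ((PySem.List.pyGet? risk 0).getD []).length := by
  set N := n.toNat with hN
  have hnN : n = (N : Int) := by omega
  have hlen : (PySem.List.pyRange 0 n 1).length = N := by
    rw [PySem.List.pyRange_one]; simp; omega
  have hlen1 : (PySem.List.pyRange 0 (n - 1) 1).length = N - 1 := by
    rw [PySem.List.pyRange_one]; simp; omega
  simp only [build_large_map_alt]
  rw [strip_fold, hlen]
  simp only [List.nil_append, List.map_flatMap, pvE]
  apply pvFlatMapCongr
  intro k _
  rw [incT_iter]
  simp only [List.map_map]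
  apply List.map_congr_left
  intro row _
  simp only [Function.comp, List.map_map]
  rw [row_fold, hlen1]
  simp only [Function.comp]
  rw [extend_flatMap N (by omega)]
  apply pvFlatMapCongr
  intro m _
  rw [incR_iter]
  simp only [List.map_map]
  apply List.map_congr_left
  intro x _
  simp only [Function.comp]
  exact scalar2 k m x

-- ===== VERDICT (by name: the statement is the Claim_ definition above) =====
theorem build_large_map_spec : Claim_equal_build_large_map := by
  intro risk n _ hpre
  unfold Spec_build_large_map
  by_cases hn : 0 < n
  · obtain ⟨hne, hrow⟩ := hpre
    obtain _ | ⟨first, rest⟩ := risk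
    · exact absurd rfl hne
    · have hrow' : ∀ row ∈ first :: rest, first.length ≤ row.length := by
        intro row hr; exact hrow hn row hr
      rw [A_eq_E first rest n hn hrow', B_eq_E _ n hn]
      simp [PySem.List.pyGet?_zero_cons]
  · have hA0 : n * ((risk.length : Nat) : Int) ≤ 0 :=
      mul_nonpos_of_nonpos_of_nonneg (by omega) (by positivity)
    simp only [build_large_map, build_large_map_alt]
    rw [PySem.List.pyRange_one_eq_nil hA0, PySem.List.pyRange_one_eq_nil (by omega : n ≤ (0:Int))]
    simp
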